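-- pv_equiv track=rewrite | github.com/TheYoBots/Lishogi-Bot | util.py | fixPocket
-- ===== SOURCE A (Python) =====
-- def fixPocket(sfen) -> str:
--     splitted = sfen.split(' ')
--     if(len(splitted) > 2 and splitted[2] != '-'):
--         # rook, bishop, gold, silver, knight, lance, pawn
--         pieceOrder = "RBGSNLPrbgsnlp"
--         pocket = ""
--         for i in "RBGSNLPrbgsnlp":
--             c = splitted[2].count(i)
--             if c == 0:
--                 pass
--             elif c == 1:
--                 pocket += i
--             else:
--                 pocket += str(c) + i
--
--         splitted[2] = pocket
--     return ' '.join(splitted)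
-- ===== SOURCE B (Python) =====
-- def fixPocket(sfen) -> str:
--     splitted = sfen.split(' ')
--     if len(splitted) > 2 and splitted[2] != '-':
--         pieceOrder = "RBGSNLPrbgsnlp"
--         kept = sorted((ch for ch in splitted[2] if ch in pieceOrder),
--                       key=pieceOrder.index)
--         pocket = ""
--         run = 0
--         for j, ch in enumerate(kept):
--             run += 1
--             if j + 1 == len(kept) or kept[j + 1] != ch:
--                 pocket += ch if run == 1 else str(run) + ch
--                 run = 0
--         splitted[2] = pocket
--     return ' '.join(splitted)
-- ===== Notes on version B (the rewrite author's own statement) =====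
-- stated objective: idiomatic
-- what changed: Instead of scanning the pocket token 14 times with .count (once per piece letter), B filters the token to piece characters, stably sorts them by their index in pieceOrder, and run-length-encodes the sorted sequence in one pass.
import Mathlib
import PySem

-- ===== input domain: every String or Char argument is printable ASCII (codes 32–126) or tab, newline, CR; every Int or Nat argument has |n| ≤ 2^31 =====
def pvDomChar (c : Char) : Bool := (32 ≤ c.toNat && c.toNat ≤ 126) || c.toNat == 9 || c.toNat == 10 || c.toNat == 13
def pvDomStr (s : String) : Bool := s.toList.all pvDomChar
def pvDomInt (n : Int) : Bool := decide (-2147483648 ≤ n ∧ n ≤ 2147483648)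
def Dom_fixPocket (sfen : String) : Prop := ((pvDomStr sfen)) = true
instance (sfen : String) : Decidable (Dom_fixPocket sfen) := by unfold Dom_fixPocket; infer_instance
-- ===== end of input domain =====

-- B sorts the pocket's piece characters into pieceOrder order and run-length-encodes
-- the sorted run once, instead of A's fourteen .count scans; objective: idiomatic/alternative.

-- ===== PORT A =====
-- the literal "RBGSNLPrbgsnlp" A iterates over, as a char list
def pieceOrderA : List Char := "RBGSNLPrbgsnlp".toList

def fixPocket (sfen : String) : String :=
  let splitted := (PySem.Str.split? sfen " ").getD []
  let splitted :=
    if 2 < splitted.length ∧ splitted.getD 2 "" ≠ "-" then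
      -- splitted[2].count(i) for a single char i is exactly the char count (exact)
      let t := (splitted.getD 2 "").toList
      let pocket := pieceOrderA.foldl (fun pocket i =>
        let c := t.count i
        if c = 0 then pocket
        else if c = 1 then pocket ++ [i]
        else pocket ++ PySem.Int.toChars (c : Int) ++ [i]) []
      PySem.List.pySetD splitted 2 (String.ofList pocket)
    else splitted
  PySem.Str.join " " splitted

-- ===== PORT B =====
def pieceOrderB : List Char := "RBGSNLPrbgsnlp".toList

-- pieceOrder.index(ch); ch is always a member when B calls it (kept is filtered), so getD 0 is exact
def pvKey (ch : Char) : Nat := (PySem.List.index? pieceOrderB ch).getD 0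

-- the enumerate loop of B: run counter, emit at the end of each run (kept[j+1] lookahead = head? of the rest)
def pocketLoop : List Char → Nat → List Char → List Char
  | pocket, _run, [] => pocket
  | pocket, run, ch :: rest =>
    let run := run + 1
    if rest.head? ≠ some ch then
      pocketLoop (pocket ++ (if run = 1 then [ch] else PySem.Int.toChars (run : Int) ++ [ch])) 0 rest
    else
      pocketLoop pocket run rest

def fixPocket_alt (sfen : String) : String :=
  let splitted := (PySem.Str.split? sfen " ").getD []
  let splitted :=
    if 2 < splitted.length ∧ splitted.getD 2 "" ≠ "-" then
      let kept := PySem.List.sorted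
        (((splitted.getD 2 "").toList).filter (fun ch => pieceOrderB.contains ch))
        (fun ch => pvKey ch) false
      PySem.List.pySetD splitted 2 (String.ofList (pocketLoop [] 0 kept))
    else splitted
  PySem.Str.join " " splitted

-- ===== PRECONDITION & SPEC =====
def Spec_fixPocket (sfen : String) (out : String) : Prop := out = fixPocket_alt sfen
instance (sfen : String) (out : String) : Decidable (Spec_fixPocket sfen out) := by unfold Spec_fixPocket; infer_instance

-- ===== CLAIM (what is proved, stated in full; the proofs are below) =====
def Claim_equal_fixPocket : Prop := ∀ (sfen : String), Dom_fixPocket sfen → Spec_fixPocket sfen (fixPocket sfen)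

-- ===== LEMMAS AND PROOFS =====

-- the canonical pocket content: for each piece letter in order, its run of copies
def canonical (t : List Char) : List Char :=
  pieceOrderB.flatMap (fun i => List.replicate (t.count i) i)

-- two perm, pairwise-≤ lists whose elements' keys separate them are equal
theorem eq_of_perm_pairwise_injOn {α κ : Type} [LinearOrder κ] (key : α → κ) :
    ∀ (l₁ l₂ : List α), l₁.Perm l₂ →
      l₁.Pairwise (fun a b => key a ≤ key b) → l₂.Pairwise (fun a b => key a ≤ key b) →
      (∀ a ∈ l₁, ∀ b ∈ l₂, key a = key b → a = b) → l₁ = l₂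
  | [], l₂, h, _, _, _ => by simpa using h.nil_eq
  | a :: t₁, [], h, _, _, _ => by simpa using h.symm.nil_eq
  | a :: t₁, b :: t₂, h, p₁, p₂, hinj => by
    have hab : a = b := by
      have hb1 : b ∈ a :: t₁ := h.mem_iff.mpr (by simp)
      have ha2 : a ∈ b :: t₂ := h.mem_iff.mp (by simp)
      have h1 : key a ≤ key b := by
        rcases List.mem_cons.mp hb1 with hb1 | hb1
        · exact le_of_eq (by rw [hb1])
        · exact (List.pairwise_cons.mp p₁).1 b hb1
      have h2 : key b ≤ key a := by
        rcases List.mem_cons.mp ha2 with ha2 | ha2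
        · exact le_of_eq (by rw [ha2])
        · exact (List.pairwise_cons.mp p₂).1 a ha2
      exact hinj a (by simp) b (by simp) (le_antisymm h1 h2)
    subst hab
    have ht : t₁ = t₂ :=
      eq_of_perm_pairwise_injOn key t₁ t₂ h.cons_inv
        (List.pairwise_cons.mp p₁).2 (List.pairwise_cons.mp p₂).2
        (fun x hx y hy => hinj x (by simp [hx]) y (by simp [hy]))
    rw [ht]

theorem mem_canonical {t : List Char} {x : Char} (hx : x ∈ canonical t) : x ∈ pieceOrderB := by
  unfold canonical at hx
  rcases List.mem_flatMap.mp hx with ⟨i, hi, hxi⟩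
  rwa [List.eq_of_mem_replicate hxi]

theorem key_injOn {a b : Char} (ha : a ∈ pieceOrderB) (hb : b ∈ pieceOrderB)
    (hk : pvKey a = pvKey b) : a = b := by
  unfold pvKey at hk
  rcases (PySem.List.index?_isSome_iff pieceOrderB a).mpr ha |> Option.isSome_iff_exists.mp with ⟨p, hp⟩
  rcases (PySem.List.index?_isSome_iff pieceOrderB b).mpr hb |> Option.isSome_iff_exists.mp with ⟨q, hq⟩
  rw [hp, hq] at hk
  simp at hk
  subst hk
  rcases PySem.List.getElem_of_index?_eq_some hp with ⟨_, hpa, _⟩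
  rcases PySem.List.getElem_of_index?_eq_some hq with ⟨_, hqb, _⟩
  rw [← hpa, ← hqb]

-- pieceOrderB is strictly increasing under pvKey (a concrete computation)
theorem pieceOrder_strict : pieceOrderB.Pairwise (fun a b => pvKey a < pvKey b) := by decide

theorem canonical_pairwise (t : List Char) :
    (canonical t).Pairwise (fun a b => pvKey a ≤ pvKey b) := by
  unfold canonical
  rw [List.pairwise_flatMap]
  constructor
  · intro i _
    exact List.Pairwise.imp (by intro a b h; omega)
      (by
        have : ∀ x ∈ List.replicate (t.count i) i, ∀ y ∈ List.replicate (t.count i) i, pvKey x = pvKey y := by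
          intro x hx y hy
          rw [List.eq_of_mem_replicate hx, List.eq_of_mem_replicate hy]
        exact List.pairwise_of_forall_mem_list (fun x hx y hy => le_of_eq (this x hx y hy)))
  · refine List.Pairwise.imp ?_ pieceOrder_strict
    intro i j hij x hx y hy
    rw [List.eq_of_mem_replicate hx, List.eq_of_mem_replicate hy]
    exact le_of_lt hij

theorem canonical_perm (t : List Char) :
    (canonical t).Perm (t.filter (fun ch => pieceOrderB.contains ch)) := by
  rw [List.perm_iff_count]
  intro a
  have nd : pieceOrderB.Nodup := by decide
  have main : ∀ (P : List Char), P.Nodup →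
      (P.flatMap (fun i => List.replicate (t.count i) i)).count a
        = if a ∈ P then t.count a else 0 := by
    intro P
    induction P with
    | nil => simp
    | cons p P ih =>
      intro hnd
      rw [List.nodup_cons] at hnd
      rw [List.flatMap_cons, List.count_append, List.count_replicate, ih hnd.2]
      by_cases hpa : p = a
      · subst hpa
        simp [hnd.1]
      · simp [hpa, Ne.symm hpa, List.mem_cons]
  unfold canonical
  rw [main pieceOrderB nd]
  by_cases h : a ∈ pieceOrderB
  · rw [if_pos h]
    exact (List.count_filter (by simpa using h)).symm
  · rw [if_neg h]
    symm
    rw [List.count_eq_zero]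
    intro hc
    exact h (by simpa using (List.mem_filter.mp hc).2)

theorem kept_eq_canonical (t : List Char) :
    PySem.List.sorted (t.filter (fun ch => pieceOrderB.contains ch)) (fun ch => pvKey ch) false
      = canonical t := by
  apply eq_of_perm_pairwise_injOn pvKey
  · exact (PySem.List.sorted_perm _ _ _).trans (canonical_perm t).symm
  · exact PySem.List.sorted_pairwise _ _
  · exact canonical_pairwise t
  · intro a ha b hb
    have ha' : a ∈ pieceOrderB := by
      have := (PySem.List.mem_sorted ..).mp ha
      simpa using List.of_mem_filter this
    exact key_injOn ha' (mem_canonical hb)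

-- head of a canonical tail is one of its piece letters
theorem head_flatMap_mem {P : List Char} {cnt : Char → Nat} {x : Char}
    (h : (P.flatMap (fun i => List.replicate (cnt i) i)).head? = some x) : x ∈ P := by
  have : x ∈ P.flatMap (fun i => List.replicate (cnt i) i) := List.mem_of_mem_head? h
  rcases List.mem_flatMap.mp this with ⟨i, hi, hxi⟩
  rwa [List.eq_of_mem_replicate hxi]

-- consuming one full run of i
theorem pocketLoop_replicate (i : Char) (rest : List Char) (hrest : rest.head? ≠ some i) :
    ∀ (n : Nat) (pocket : List Char) (run : Nat),
      pocketLoop pocket run (List.replicate (n + 1) i ++ rest)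
        = pocketLoop (pocket ++ (if run + n + 1 = 1 then [i]
            else PySem.Int.toChars ((run + n + 1 : Nat) : Int) ++ [i])) 0 rest := by
  intro n
  induction n with
  | zero =>
    intro pocket run
    simp only [Nat.zero_add, List.replicate_one, List.cons_append, List.nil_append, pocketLoop]
    rw [if_pos hrest]
  | succ m ih =>
    intro pocket run
    have hh : ((List.replicate (m + 1) i ++ rest).head? = some i) := by
      simp [List.replicate_succ]
    rw [List.replicate_succ, List.cons_append, pocketLoop]
    simp only [hh, ne_eq, not_true_eq_false, if_false]
    have harith : run + 1 + m + 1 = run + (m + 1) + 1 := by omega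
    rw [ih pocket (run + 1), harith]

theorem foldl_eq_pocketLoop (cnt : Char → Nat) :
    ∀ (P : List Char), P.Nodup → ∀ (pocket : List Char),
      P.foldl (fun pocket i =>
          let c := cnt i
          if c = 0 then pocket
          else if c = 1 then pocket ++ [i]
          else pocket ++ PySem.Int.toChars (c : Int) ++ [i]) pocket
        = pocketLoop pocket 0 (P.flatMap (fun i => List.replicate (cnt i) i)) := by
  intro P
  induction P with
  | nil => intro _ pocket; simp [pocketLoop]
  | cons p P ih =>
    intro hnd pocket
    rw [List.nodup_cons] at hnd
    rw [List.foldl_cons, List.flatMap_cons]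
    by_cases h0 : cnt p = 0
    · simp only [h0, List.replicate_zero, List.nil_append]
      exact ih hnd.2 pocket
    · obtain ⟨n, hn⟩ : ∃ n, cnt p = n + 1 := ⟨cnt p - 1, by omega⟩
      have hrest : (P.flatMap (fun i => List.replicate (cnt i) i)).head? ≠ some p := by
        intro hc
        exact hnd.1 (head_flatMap_mem hc)
      rw [hn, pocketLoop_replicate p _ hrest n _ 0]
      simp only [Nat.zero_add]
      by_cases h1 : n = 0
      · subst h1
        simp only [if_neg (by omega : ¬ (0:Nat) + 1 = 0)]
        rw [ih hnd.2]
        simp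
      · simp only [if_neg (by omega : ¬ n + 1 = 0), if_neg (by omega : ¬ n + 1 = 1)]
        rw [ih hnd.2]
        congr 1
        simp [List.append_assoc]

theorem pocket_eq (t : List Char) :
    pieceOrderA.foldl (fun pocket i =>
        let c := t.count i
        if c = 0 then pocket
        else if c = 1 then pocket ++ [i]
        else pocket ++ PySem.Int.toChars (c : Int) ++ [i]) []
      = pocketLoop [] 0
          (PySem.List.sorted (t.filter (fun ch => pieceOrderB.contains ch)) (fun ch => pvKey ch) false) := by
  rw [kept_eq_canonical]
  unfold canonical
  have : pieceOrderA = pieceOrderB := rfl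
  rw [this]
  exact foldl_eq_pocketLoop (fun i => t.count i) pieceOrderB (by decide) []

-- ===== VERDICT (by name: the statement is the Claim_ definition above) =====
theorem fixPocket_spec : Claim_equal_fixPocket := by
  intro sfen _
  unfold Spec_fixPocket fixPocket fixPocket_alt
  simp only []
  by_cases h : 2 < ((PySem.Str.split? sfen " ").getD []).length ∧ ((PySem.Str.split? sfen " ").getD []).getD 2 "" ≠ "-"
  · rw [if_pos h, if_pos h, pocket_eq]
  · rw [if_neg h, if_neg h]
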